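-- pv_equiv track=rewrite | github.com/sangaline/dodona | glaze.py | SwapGenes
-- ===== SOURCE A (Python) =====
-- def SwapGenes(keyBoard_A, keyBoard_B, co_index):
--     newGenesA = keyBoard_B[0:co_index] #the new genes to be swapped into chromosome A
--     newGenesB = keyBoard_A[0:co_index] #   "           "            "  chromosome B
--
--     oldGenesA = keyBoard_A[co_index:len(keyBoard_A)] #the unnaffected genes from chromosome A
--     oldGenesB = keyBoard_B[co_index:len(keyBoard_B)] # "      "          "       chromosome B
--
--     newChromeA = newGenesA+oldGenesA
--     newChromeB = newGenesB+oldGenesB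
--
--     swpCommon = list(set(newGenesA)&set(newGenesB))  #find any genes that were swapped from both chromosomes
--     for i in range(len(swpCommon)):
--         newGenesA.remove(swpCommon[i])
--         newGenesB.remove(swpCommon[i])
--
--     swpPairs = []
--     for i in range(len(newGenesA)):
--         swpPairs.append((newGenesA[i],newGenesB[i]))
--
--
--     tmpChromeA = newChromeA[co_index:len(newChromeA)]
--     tmpChromeB = newChromeB[co_index:len(newChromeB)]
--     for i in range(len(swpPairs)):
--         tmpChromeA = [swpPairs[i][1] if x==swpPairs[i][0] else x for x in tmpChromeA]
--         tmpChromeB = [swpPairs[i][0] if x==swpPairs[i][1] else x for x in tmpChromeB]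
--
--     finalChromeA = newChromeA[0:co_index]+tmpChromeA
--     finalChromeB = newChromeB[0:co_index]+tmpChromeB
--
--     return finalChromeA, finalChromeB
-- ===== SOURCE B (Python) =====
-- def _drop_first(xs, vals):
--     # drop the first occurrence of each value in vals, one pass
--     pending = set(vals)
--     out = []
--     for x in xs:
--         if x in pending:
--             pending.discard(x)
--         else:
--             out.append(x)
--     return out
--
--
-- def _resolve(pairs):
--     # compose the sequential substitutions a->b into one mapping
--     m = {}
--     for a, b in pairs:
--         for k in m:
--             if m[k] == a:
--                 m[k] = b
--         if a not in m:
--             m[a] = b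
--     return m
--
--
-- def SwapGenes(keyBoard_A, keyBoard_B, co_index):
--     segA = keyBoard_B[0:co_index]
--     segB = keyBoard_A[0:co_index]
--     chromeA = segA + keyBoard_A[co_index:len(keyBoard_A)]
--     chromeB = segB + keyBoard_B[co_index:len(keyBoard_B)]
--
--     common = set(segA) & set(segB)
--     ga = _drop_first(segA, common)
--     gb = _drop_first(segB, common)
--
--     mapA = _resolve(zip(ga, gb))
--     mapB = _resolve(zip(gb, ga))
--
--     finalA = chromeA[0:co_index] + [mapA.get(x, x) for x in chromeA[co_index:len(chromeA)]]
--     finalB = chromeB[0:co_index] + [mapB.get(x, x) for x in chromeB[co_index:len(chromeB)]]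
--     return finalA, finalB
-- ===== Notes on version B (the rewrite author's own statement) =====
-- stated objective: faster
-- what changed: A removes common genes with repeated list.remove calls and applies each swap pair as a full substitution pass over the whole tail; B drops common genes in one pass with a pending set and composes all swap pairs into a single resolved dict, then rewrites the tail with one dict-lookup pass.
import Mathlib
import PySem

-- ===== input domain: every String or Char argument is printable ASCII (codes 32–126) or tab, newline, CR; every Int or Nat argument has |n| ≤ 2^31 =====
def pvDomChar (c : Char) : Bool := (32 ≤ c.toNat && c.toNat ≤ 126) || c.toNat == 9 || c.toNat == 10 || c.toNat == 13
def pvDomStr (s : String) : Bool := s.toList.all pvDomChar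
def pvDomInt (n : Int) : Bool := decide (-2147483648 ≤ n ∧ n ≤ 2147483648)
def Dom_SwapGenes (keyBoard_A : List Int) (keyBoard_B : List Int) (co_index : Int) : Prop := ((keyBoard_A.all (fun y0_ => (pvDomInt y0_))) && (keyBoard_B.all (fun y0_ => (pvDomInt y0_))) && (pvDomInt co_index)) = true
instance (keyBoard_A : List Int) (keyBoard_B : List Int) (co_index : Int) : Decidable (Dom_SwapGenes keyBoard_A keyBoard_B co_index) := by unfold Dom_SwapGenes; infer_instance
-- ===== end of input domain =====

-- B replaces A's cascade of whole-tail substitution passes (one per swap pair) by a single dict of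
-- resolved substitutions looked up in one pass over the tail (and the remove-loop by a one-pass filter): faster, same results.


-- ===== PORT A =====
def SwapGenes (keyBoard_A : List Int) (keyBoard_B : List Int) (co_index : Int) : List Int × List Int :=
  let newGenesA := PySem.List.slice keyBoard_B (some 0) (some co_index)
  let newGenesB := PySem.List.slice keyBoard_A (some 0) (some co_index)
  let oldGenesA := PySem.List.slice keyBoard_A (some co_index) (some (keyBoard_A.length : Int))
  let oldGenesB := PySem.List.slice keyBoard_B (some co_index) (some (keyBoard_B.length : Int))
  let newChromeA := newGenesA ++ oldGenesA
  let newChromeB := newGenesB ++ oldGenesB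
  let swpCommon := PySem.Set.inter (PySem.Set.ofList newGenesA) (PySem.Set.ofList newGenesB)
  -- list.remove: every element of swpCommon occurs in both lists, so the ValueError branch (none) never fires
  let newGenesA' := swpCommon.foldl (fun l v => (PySem.List.remove? l v).getD l) newGenesA
  let newGenesB' := swpCommon.foldl (fun l v => (PySem.List.remove? l v).getD l) newGenesB
  -- newGenesB[i] out of range = IndexError; those inputs are exactly the ones excluded by Pre_SwapGenes
  let swpPairs := (List.range newGenesA'.length).foldl
      (fun acc (i : Nat) => acc ++ [((PySem.List.pyGet? newGenesA' (i : Int)).getD 0,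
                             (PySem.List.pyGet? newGenesB' (i : Int)).getD 0)]) []
  let tmpChromeA0 := PySem.List.slice newChromeA (some co_index) (some (newChromeA.length : Int))
  let tmpChromeB0 := PySem.List.slice newChromeB (some co_index) (some (newChromeB.length : Int))
  let tmpChromeA := swpPairs.foldl (fun l p => l.map (fun x => if x == p.1 then p.2 else x)) tmpChromeA0
  let tmpChromeB := swpPairs.foldl (fun l p => l.map (fun x => if x == p.2 then p.1 else x)) tmpChromeB0
  (PySem.List.slice newChromeA (some 0) (some co_index) ++ tmpChromeA,
   PySem.List.slice newChromeB (some 0) (some co_index) ++ tmpChromeB)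

-- ===== PORT B =====
-- one pass over xs dropping the first occurrence of each value of vals (Source B _drop_first)
def pvDropFirst (xs : List Int) (vals : PySem.Set Int) : List Int :=
  (xs.foldl (fun (st : PySem.Set Int × List Int) x =>
      if PySem.Set.contains st.1 x then (PySem.Set.discard st.1 x, st.2)
      else (st.1, st.2 ++ [x])) (vals, [])).2

-- Source B _resolve: compose the sequential substitutions a→b into one mapping (loop body, then the loop)
def pvResolveStep (m : PySem.Dict Int Int) (p : Int × Int) : PySem.Dict Int Int :=
  let m1 : PySem.Dict Int Int := ⟨m.items.map (fun kv => if kv.2 == p.1 then (kv.1, p.2) else kv)⟩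
  if m1.contains p.1 then m1 else m1.insert p.1 p.2

def pvResolve (pairs : List (Int × Int)) : PySem.Dict Int Int :=
  pairs.foldl pvResolveStep PySem.Dict.empty


def SwapGenes_alt (keyBoard_A : List Int) (keyBoard_B : List Int) (co_index : Int) : List Int × List Int :=
  let segA := PySem.List.slice keyBoard_B (some 0) (some co_index)
  let segB := PySem.List.slice keyBoard_A (some 0) (some co_index)
  let chromeA := segA ++ PySem.List.slice keyBoard_A (some co_index) (some (keyBoard_A.length : Int))
  let chromeB := segB ++ PySem.List.slice keyBoard_B (some co_index) (some (keyBoard_B.length : Int))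
  let common := PySem.Set.inter (PySem.Set.ofList segA) (PySem.Set.ofList segB)
  let ga := pvDropFirst segA common
  let gb := pvDropFirst segB common
  let mapA := pvResolve (ga.zip gb)
  let mapB := pvResolve (gb.zip ga)
  (PySem.List.slice chromeA (some 0) (some co_index) ++
     (PySem.List.slice chromeA (some co_index) (some (chromeA.length : Int))).map (fun x => mapA.getD x x),
   PySem.List.slice chromeB (some 0) (some co_index) ++
     (PySem.List.slice chromeB (some co_index) (some (chromeB.length : Int))).map (fun x => mapB.getD x x))

-- ===== PRECONDITION & SPEC =====
-- A raises IndexError in its pairing loop exactly when the segment taken from keyBoard_B is longer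
-- than the one taken from keyBoard_A; Pre_ excludes exactly those inputs (A returns everywhere else).
def Pre_SwapGenes (keyBoard_A : List Int) (keyBoard_B : List Int) (co_index : Int) : Prop :=
  (PySem.List.slice keyBoard_B (some 0) (some co_index)).length ≤
    (PySem.List.slice keyBoard_A (some 0) (some co_index)).length
instance (keyBoard_A : List Int) (keyBoard_B : List Int) (co_index : Int) : Decidable (Pre_SwapGenes keyBoard_A keyBoard_B co_index) := by unfold Pre_SwapGenes; infer_instance

def pvWitness_SwapGenes : List Int × List Int × Int := ([1, 2, 3, 4], [3, 4, 5, 6], 2)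

def Spec_SwapGenes (keyBoard_A : List Int) (keyBoard_B : List Int) (co_index : Int) (out : List Int × List Int) : Prop := out = SwapGenes_alt keyBoard_A keyBoard_B co_index
instance (keyBoard_A : List Int) (keyBoard_B : List Int) (co_index : Int) (out : List Int × List Int) : Decidable (Spec_SwapGenes keyBoard_A keyBoard_B co_index out) := by unfold Spec_SwapGenes; infer_instance

-- ===== CLAIM (what is proved, stated in full; the proofs are below) =====
def Claim_equal_SwapGenes : Prop := ∀ (keyBoard_A : List Int) (keyBoard_B : List Int) (co_index : Int), Dom_SwapGenes keyBoard_A keyBoard_B co_index → Pre_SwapGenes keyBoard_A keyBoard_B co_index → Spec_SwapGenes keyBoard_A keyBoard_B co_index (SwapGenes keyBoard_A keyBoard_B co_index)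

-- ===== LEMMAS AND PROOFS =====

def pvDropAux : PySem.Set Int → List Int → List Int
  | _, [] => []
  | P, x :: r => if PySem.Set.contains P x then pvDropAux (PySem.Set.discard P x) r else x :: pvDropAux P r

theorem pvDropFirst_aux_gen (xs : List Int) (P : PySem.Set Int) (acc : List Int) :
    (xs.foldl (fun (st : PySem.Set Int × List Int) x =>
      if PySem.Set.contains st.1 x then (PySem.Set.discard st.1 x, st.2)
      else (st.1, st.2 ++ [x])) (P, acc)).2 = acc ++ pvDropAux P xs := by
  induction xs generalizing P acc with
  | nil => simp [pvDropAux]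
  | cons x r ih =>
    simp only [List.foldl_cons, pvDropAux]
    by_cases h : x ∈ P
    · rw [if_pos ((PySem.Set.contains_iff P x).2 h), if_pos ((PySem.Set.contains_iff P x).2 h), ih]
    · rw [if_neg (by simp [PySem.Set.contains_iff, h]), if_neg (by simp [PySem.Set.contains_iff, h]), ih]
      simp

theorem pvDropFirst_eq_aux (xs : List Int) (vals : PySem.Set Int) :
    pvDropFirst xs vals = pvDropAux vals xs := by
  have := pvDropFirst_aux_gen xs vals []
  simpa [pvDropFirst] using this

theorem pvDropAux_congr (xs : List Int) (P Q : PySem.Set Int)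
    (h : ∀ y : Int, y ∈ P ↔ y ∈ Q) : pvDropAux P xs = pvDropAux Q xs := by
  induction xs generalizing P Q with
  | nil => rfl
  | cons x r ih =>
    by_cases hp : x ∈ P
    · have hq : x ∈ Q := (h x).1 hp
      simp only [pvDropAux]
      rw [if_pos ((PySem.Set.contains_iff P x).2 hp), if_pos ((PySem.Set.contains_iff Q x).2 hq)]
      exact ih _ _ (fun y => by rw [PySem.Set.mem_discard, PySem.Set.mem_discard, h y])
    · have hq : x ∉ Q := fun hx => hp ((h x).2 hx)
      simp only [pvDropAux]
      rw [if_neg (by simp [PySem.Set.contains_iff, hp]), if_neg (by simp [PySem.Set.contains_iff, hq])]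
      rw [ih _ _ h]

def pvRemoveOnce (l : List Int) (v : Int) : List Int := (PySem.List.remove? l v).getD l
theorem pvRemoveOnce_cons (x : Int) (r : List Int) (v : Int) :
    pvRemoveOnce (x :: r) v = if x == v then r else x :: pvRemoveOnce r v := by
  simp only [pvRemoveOnce, PySem.List.remove?, List.idxOf?_cons]
  by_cases hx : x = v
  · simp [hx]
  · simp only [beq_iff_eq, hx, if_false]
    cases h : List.idxOf? v r with
    | none => simp [h]
    | some k => simp [h, List.eraseIdx_cons_succ]

theorem pvDropAux_removeOnce (xs : List Int) (P : PySem.Set Int) (v : Int) (hv : v ∈ P) :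
    pvDropAux P xs = pvDropAux (PySem.Set.discard P v) (pvRemoveOnce xs v) := by
  induction xs generalizing P with
  | nil => rfl
  | cons x r ih =>
    rw [pvRemoveOnce_cons]
    by_cases hx : x = v
    · subst hx
      simp only [beq_self_eq_true, if_true, pvDropAux]
      rw [if_pos ((PySem.Set.contains_iff P x).2 hv)]
    · simp only [beq_iff_eq, hx, if_false, pvDropAux]
      by_cases hp : x ∈ P
      · rw [if_pos ((PySem.Set.contains_iff P x).2 hp),
            if_pos ((PySem.Set.contains_iff _ x).2 ((PySem.Set.mem_discard P v x).2 ⟨hp, hx⟩))]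
        rw [ih (PySem.Set.discard P x) ((PySem.Set.mem_discard P x v).2 ⟨hv, fun h => hx h.symm⟩)]
        exact pvDropAux_congr _ _ _ (fun y => by
          simp only [PySem.Set.mem_discard]; tauto)
      · rw [if_neg (by simp [PySem.Set.contains_iff, hp]),
            if_neg (by simp [PySem.Set.contains_iff, PySem.Set.mem_discard, hp]),
            ih P hv]

theorem pvFoldlRemove_eq_dropAux (vals : List Int) (xs : List Int) (h : vals.Nodup) :
    vals.foldl (fun l v => (PySem.List.remove? l v).getD l) xs = pvDropAux vals xs := by
  induction vals generalizing xs with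
  | nil =>
    simp only [List.foldl_nil]
    induction xs with
    | nil => rfl
    | cons x r ih2 =>
      simp only [pvDropAux]
      rw [show PySem.Set.contains ([] : PySem.Set Int) x = false from rfl]
      simp only [Bool.false_eq_true, if_false]
      rw [← ih2]
  | cons v vs ih =>
    simp only [List.foldl_cons]
    simp only [List.nodup_cons] at h
    rw [ih _ h.2]
    rw [pvDropAux_removeOnce xs (v :: vs) v (by simp)]
    refine pvDropAux_congr _ _ _ (fun y => ?_)
    simp only [PySem.Set.mem_discard, List.mem_cons]
    constructor
    · intro hy
      refine ⟨Or.inr hy, ?_⟩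
      rintro rfl
      exact h.1 hy
    · rintro ⟨hy1 | hy2, hne⟩
      · exact absurd hy1 hne
      · exact hy2

theorem pvDiscard_length (P : List Int) (x : Int) (hnd : P.Nodup) (hx : x ∈ P) :
    (PySem.Set.discard P x).length + 1 = P.length := by
  induction P with
  | nil => simp at hx
  | cons p ps ihp =>
    simp only [List.nodup_cons] at hnd
    rcases List.mem_cons.1 hx with he | hm2
    · subst he
      simp only [PySem.Set.discard, List.filter_cons, beq_self_eq_true, Bool.not_true,
        Bool.false_eq_true, if_false, List.length_cons, Nat.add_left_inj]
      rw [List.filter_eq_self.2 (fun y hy => by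
        simp only [Bool.not_eq_true', beq_eq_false_iff_ne]
        rintro rfl
        exact hnd.1 hy)]
    · have hne : (!(p == x)) = true := by
        simp only [Bool.not_eq_true', beq_eq_false_iff_ne]
        rintro rfl
        exact hnd.1 hm2
      simp only [PySem.Set.discard, List.filter_cons, hne, if_true, List.length_cons]
      rw [← ihp hnd.2 hm2]
      rfl

theorem pvDropAux_length (xs : List Int) (P : PySem.Set Int) (hnd : P.Nodup)
    (hm : ∀ v ∈ P, v ∈ xs) : (pvDropAux P xs).length + P.length = xs.length := by
  induction xs generalizing P with
  | nil =>
    cases P with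
    | nil => rfl
    | cons v vs => exact absurd (hm v (by simp)) (by simp)
  | cons x r ih =>
    by_cases hp : x ∈ P
    · simp only [pvDropAux]
      rw [if_pos ((PySem.Set.contains_iff P x).2 hp)]
      have h1 := ih (PySem.Set.discard P x) (PySem.Set.nodup_discard P x hnd) (fun v hv => by
        rcases (PySem.Set.mem_discard P x v).1 hv with ⟨hv1, hv2⟩
        rcases List.mem_cons.1 (hm v hv1) with he | h2
        · exact absurd he hv2
        · exact h2)
      have h2 := pvDiscard_length P x hnd hp
      simp only [List.length_cons]
      omega
    · simp only [pvDropAux]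
      rw [if_neg (by simp [PySem.Set.contains_iff, hp])]
      have h1 := ih P hnd (fun v hv => by
        rcases List.mem_cons.1 (hm v hv) with he | h2
        · exact absurd (he ▸ hv) hp
        · exact h2)
      simp only [List.length_cons]
      omega

theorem pvPyGetD (xs : List Int) (n : Nat) (h : n < xs.length) :
    (PySem.List.pyGet? xs (n : Int)).getD 0 = xs[n] := by
  simp [PySem.List.pyGet?, PySem.List.pyIdx?, h]

theorem pvPairs_eq_zip (la lb : List Int) (h : la.length ≤ lb.length) :
    (List.range la.length).foldl
      (fun acc (i : Nat) => acc ++ [((PySem.List.pyGet? la (i : Int)).getD 0,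
                             (PySem.List.pyGet? lb (i : Int)).getD 0)]) [] = la.zip lb := by
  rw [PySem.List.foldl_append_singleton_eq_map]
  simp only [List.nil_append]
  apply List.ext_getElem
  · simp [List.length_zip]; omega
  · intro i hi _
    have hia : i < la.length := by simpa using hi
    have hib : i < lb.length := lt_of_lt_of_le hia h
    simp only [List.getElem_map, List.getElem_range, List.getElem_zip]
    rw [pvPyGetD la i hia, pvPyGetD lb i hib]

theorem pvFoldMap_eq_mapFold (f : Int × Int → Int → Int) (pairs : List (Int × Int)) (t : List Int) :
    pairs.foldl (fun l p => l.map (f p)) t = t.map (fun x => pairs.foldl (fun y p => f p y) x) := by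
  induction pairs generalizing t with
  | nil => simp
  | cons p ps ih =>
    simp only [List.foldl_cons, ih, List.map_map]
    rfl

theorem pvMapVals_get? (items : List (Int × Int)) (a b x : Int) :
    (PySem.Dict.mk (items.map (fun kv => if kv.2 == a then (kv.1, b) else kv))).get? x
      = ((PySem.Dict.mk items).get? x).map (fun v => if v == a then b else v) := by
  induction items with
  | nil => rfl
  | cons kv rest ih =>
    obtain ⟨k, w⟩ := kv
    simp only [List.map_cons]
    by_cases hv : w = a
    · subst hv
      simp only [beq_self_eq_true, if_true]
      rw [PySem.Dict.get?_mk_cons, PySem.Dict.get?_mk_cons]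
      by_cases hk : k = x
      · simp [hk]
      · rw [if_neg (by simp [hk]), if_neg (by simp [hk])]
        exact ih
    · rw [show ((((k, w) : Int × Int).2 == a) = false) by simp [hv]]
      simp only [Bool.false_eq_true, if_false]
      rw [PySem.Dict.get?_mk_cons, PySem.Dict.get?_mk_cons]
      by_cases hk : k = x
      · rw [if_pos (by simp [hk]), if_pos (by simp [hk])]
        simp [hv]
      · rw [if_neg (by simp [hk]), if_neg (by simp [hk])]
        exact ih

theorem pvMapVals_contains (items : List (Int × Int)) (a b y : Int) :
    (PySem.Dict.mk (items.map (fun kv => if kv.2 == a then (kv.1, b) else kv))).contains y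
      = (PySem.Dict.mk items).contains y := by
  simp only [PySem.Dict.contains, List.any_map]
  apply PySem.List.any_congr_mem
  intro kv _
  by_cases hv : kv.2 = a <;> simp [hv, Function.comp]

theorem pvResolveStep_getD (m : PySem.Dict Int Int) (a b x : Int) :
    (pvResolveStep m (a, b)).getD x x = if m.getD x x == a then b else m.getD x x := by
  unfold pvResolveStep
  simp only []
  have hc := pvMapVals_contains m.items a b a
  have hg := pvMapVals_get? m.items a b x
  by_cases hca : (PySem.Dict.mk m.items).contains a = true
  · rw [if_pos (by rw [hc]; exact hca)]
    cases hx : m.get? x with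
    | some v =>
      rw [PySem.Dict.getD, hg]
      simp only [hx, Option.map_some, Option.getD_some]
      rw [PySem.Dict.getD, hx]
      rfl
    | none =>
      rw [PySem.Dict.getD, hg]
      simp only [hx, Option.map_none, Option.getD_none]
      rw [PySem.Dict.getD, hx]
      simp only [Option.getD_none]
      have hxa : x ≠ a := by
        rintro rfl
        rw [PySem.Dict.contains_eq_isSome_get?] at hca
        simp [hx] at hca
      simp [hxa]
  · rw [if_neg (by rw [hc]; exact hca)]
    by_cases hxa : x = a
    · subst hxa
      rw [PySem.Dict.getD, PySem.Dict.get?_insert_self]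
      have hx : m.get? x = none := by
        rw [PySem.Dict.contains_eq_isSome_get?] at hca
        cases hh : m.get? x
        · rfl
        · rw [hh] at hca; simp at hca
      rw [PySem.Dict.getD, hx]
      simp
    · rw [PySem.Dict.getD, PySem.Dict.get?_insert_of_ne _ _ hxa, hg]
      cases hx : m.get? x with
      | some v =>
        simp only [Option.map_some, Option.getD_some]
        rw [PySem.Dict.getD, hx]
        rfl
      | none =>
        simp only [Option.map_none, Option.getD_none]
        rw [PySem.Dict.getD, hx]
        simp [hxa]

theorem pvResolve_getD (pairs : List (Int × Int)) (x : Int) :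
    (pvResolve pairs).getD x x = pairs.foldl (fun y p => if y == p.1 then p.2 else y) x := by
  suffices h : ∀ (ps : List (Int × Int)) (m : PySem.Dict Int Int),
      (ps.foldl pvResolveStep m).getD x x
      = ps.foldl (fun y p => if y == p.1 then p.2 else y) (m.getD x x) by
    have := h pairs PySem.Dict.empty
    rw [pvResolve, this, PySem.Dict.getD_empty]
  intro ps
  induction ps with
  | nil => intro m; rfl
  | cons p pr ih =>
    intro m
    simp only [List.foldl_cons]
    rw [ih]
    obtain ⟨a, b⟩ := p
    rw [pvResolveStep_getD m a b x]

-- A's cascade of substitution passes equals one lookup pass through the resolved dict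
theorem pvSideA (pairs : List (Int × Int)) (t : List Int) :
    pairs.foldl (fun l p => l.map (fun x => if x == p.1 then p.2 else x)) t
      = t.map (fun x => (pvResolve pairs).getD x x) := by
  rw [pvFoldMap_eq_mapFold (f := fun p x => if x == p.1 then p.2 else x)]
  exact List.map_congr_left (fun x _ => (pvResolve_getD pairs x).symm)

theorem pvSideB (pa : List (Int × Int)) (t : List Int) :
    pa.foldl (fun l p => l.map (fun x => if x == p.2 then p.1 else x)) t
      = t.map (fun x => (pvResolve (pa.map Prod.swap)).getD x x) := by
  rw [pvFoldMap_eq_mapFold (f := fun p x => if x == p.2 then p.1 else x)]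
  refine List.map_congr_left (fun x _ => ?_)
  rw [pvResolve_getD, List.foldl_map]
  rfl

-- ===== VERDICT (by name: the statement is the Claim_ definition above) =====
theorem SwapGenes_spec : Claim_equal_SwapGenes := by
  unfold Claim_equal_SwapGenes
  intro kA kB c _ hpre
  unfold Pre_SwapGenes at hpre
  unfold Spec_SwapGenes SwapGenes SwapGenes_alt
  dsimp only
  set sA := PySem.List.slice kB (some 0) (some c) with hsA
  set sB := PySem.List.slice kA (some 0) (some c) with hsB
  set common : PySem.Set Int := PySem.Set.inter (PySem.Set.ofList sA) (PySem.Set.ofList sB) with hcommon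
  have hnd : common.Nodup := PySem.Set.nodup_inter _ _ (PySem.Set.nodup_ofList sA)
  have hga : common.foldl (fun l v => (PySem.List.remove? l v).getD l) sA = pvDropFirst sA common := by
    rw [pvFoldlRemove_eq_dropAux _ _ hnd, pvDropFirst_eq_aux]
  have hgb : common.foldl (fun l v => (PySem.List.remove? l v).getD l) sB = pvDropFirst sB common := by
    rw [pvFoldlRemove_eq_dropAux _ _ hnd, pvDropFirst_eq_aux]
  have hmemA : ∀ v ∈ common, v ∈ sA := fun v hv =>
    (PySem.Set.mem_ofList sA v).1 ((PySem.Set.mem_inter _ _ v).1 hv).1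
  have hmemB : ∀ v ∈ common, v ∈ sB := fun v hv =>
    (PySem.Set.mem_ofList sB v).1 ((PySem.Set.mem_inter _ _ v).1 hv).2
  have hlA := pvDropAux_length sA common hnd hmemA
  have hlB := pvDropAux_length sB common hnd hmemB
  have hlen : (pvDropFirst sA common).length ≤ (pvDropFirst sB common).length := by
    rw [pvDropFirst_eq_aux, pvDropFirst_eq_aux]
    omega
  rw [hga]
  rw [hgb]
  rw [pvPairs_eq_zip _ _ hlen]
  rw [pvSideA]
  rw [pvSideB]
  rw [List.zip_swap]
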